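-- pv_equiv track=rewrite | github.com/Nikkuniku/AtcoderProgramming | Other/JOI/2010年 日本情報オリンピック春合宿OJ/poster.py | solve
-- ===== SOURCE A (Python) =====
-- def solve(N, K):
--     j = N-1
--     ans = []
--     while 1:
--         if j == -1:
--             ans.append('J')
--             break
--         if K <= 2**j:
--             for _ in range(2**j):
--                 ans.append('J')
--             for _ in range(2**j):
--                 ans.append('O')
--             break
--         else:
--             for _ in range(2**j):
--                 ans.append('I')
--             K -= pow(2, j)
--             j -= 1
--     return ''.join(ans)
-- ===== SOURCE B (Python) =====
-- def solve(N, K):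
--     if N == 0:
--         return 'J'
--     half = 2 ** (N - 1)
--     block = []
--     if K <= half:
--         for c in 'JO':
--             for _ in range(half):
--                 block.append(c)
--         return ''.join(block)
--     for _ in range(half):
--         block.append('I')
--     return ''.join(block) + solve(N - 1, K - half)
-- ===== Notes on version B (the rewrite author's own statement) =====
-- stated objective: alternative
-- what changed: Replaces the while-loop with a manual j counter and a single accumulator list by a direct linear recursion on N that emits one block per level and concatenates with the recursive result; Pre_ excludes N < 0, where A's range(2**j) receives a float and raises TypeError.
import Mathlib
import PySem

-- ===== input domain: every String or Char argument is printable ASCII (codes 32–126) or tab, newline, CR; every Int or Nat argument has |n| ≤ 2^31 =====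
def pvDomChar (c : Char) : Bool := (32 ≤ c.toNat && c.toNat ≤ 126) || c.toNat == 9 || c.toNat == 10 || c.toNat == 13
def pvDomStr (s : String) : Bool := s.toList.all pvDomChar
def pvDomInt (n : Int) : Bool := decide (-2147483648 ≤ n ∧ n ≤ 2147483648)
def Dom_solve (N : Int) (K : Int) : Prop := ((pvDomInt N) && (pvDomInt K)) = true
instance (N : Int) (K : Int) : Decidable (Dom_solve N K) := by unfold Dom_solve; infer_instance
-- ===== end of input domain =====

-- B replaces A's while-loop with manual j counter and accumulator list by a direct
-- linear recursion on N (simpler decomposition); Pre_ excludes N < 0, where A raises TypeError.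


-- ===== PORT A =====
-- A's while loop: j runs N-1, N-2, … ; we carry n = j+1 (a Nat), so j == -1 ↔ n = 0.
-- Each 'for _ in range(2**j): ans.append(c)' appends 2^j copies of c to the accumulator.
def solveLoopA : Nat → Int → List Char → List Char
  | 0, _, ans => ans ++ ['J']
  | n + 1, K, ans =>
      if K ≤ 2 ^ n then
        (ans ++ List.replicate (2 ^ n) 'J') ++ List.replicate (2 ^ n) 'O'
      else
        solveLoopA n (K - 2 ^ n) (ans ++ List.replicate (2 ^ n) 'I')

def solve (N : Int) (K : Int) : String := String.mk (solveLoopA N.toNat K [])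

-- ===== PORT B =====
-- B's recursion on N: base 'J'; half = 2^(N-1); each per-char append loop over range(half)
-- becomes List.replicate half c; join/concat become list append.
def solveAltGo : Nat → Int → List Char
  | 0, _ => ['J']
  | n + 1, K =>
      let half : Nat := 2 ^ n
      if K ≤ (half : Int) then
        List.replicate half 'J' ++ List.replicate half 'O'
      else
        List.replicate half 'I' ++ solveAltGo n (K - half)

def solve_alt (N : Int) (K : Int) : String := String.mk (solveAltGo N.toNat K)

-- ===== PRECONDITION & SPEC =====
-- Pre_ excludes N < 0: there A's range(2**j) gets a float and raises TypeError (B raises too).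
def Pre_solve (N : Int) (K : Int) : Prop := 0 ≤ N
instance (N : Int) (K : Int) : Decidable (Pre_solve N K) := by unfold Pre_solve; infer_instance
def pvWitness_solve : Int × Int := (3, 5)

def Spec_solve (N : Int) (K : Int) (out : String) : Prop := out = solve_alt N K
instance (N : Int) (K : Int) (out : String) : Decidable (Spec_solve N K out) := by unfold Spec_solve; infer_instance

-- ===== CLAIM (what is proved, stated in full; the proofs are below) =====
def Claim_equal_solve : Prop := ∀ (N : Int) (K : Int), Dom_solve N K → Pre_solve N K → Spec_solve N K (solve N K)

-- ===== LEMMAS AND PROOFS =====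
theorem solveLoopA_eq (n : Nat) : ∀ (K : Int) (ans : List Char),
    solveLoopA n K ans = ans ++ solveAltGo n K := by
  induction n with
  | zero => intro K ans; rfl
  | succ n ih =>
      intro K ans
      simp only [solveLoopA, solveAltGo, Nat.cast_pow, Nat.cast_ofNat]
      split
      · simp [List.append_assoc]
      · rw [ih]; simp [List.append_assoc]

-- ===== VERDICT (by name: the statement is the Claim_ definition above) =====
theorem solve_spec : Claim_equal_solve := by
  intro N K _ _
  show _ = _
  simp [solve, solve_alt, solveLoopA_eq]
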